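-- pv_equiv track=rewrite | github.com/LegendaryMakaveli/python | Assignment/Adeyemo Emmanuel/prove_of_concept_on_collection.py | sum_all_elements
-- ===== SOURCE A (Python) =====
-- def sum_all_elements(numbers) :
-- 	if not isinstance(numbers, list) :
-- 		raise TypeError("Only list is allowed")
--
-- 	if not numbers :
-- 		raise TypeError("Cannot be empty")
--
-- 	for row in numbers  :
-- 		for column in row :
-- 			if isinstance(column, str) :
-- 				raise ValueError("No string allow")
-- 			elif isinstance(column, float) :
-- 				raise ValueError("And no float")
--
-- 	total = list(map(sum, numbers))
-- 	return total
-- ===== SOURCE B (Python) =====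
-- def sum_all_elements(numbers):
--     if not isinstance(numbers, list):
--         raise TypeError("Only list is allowed")
--     if not numbers:
--         raise TypeError("Cannot be empty")
--     totals = [0] * len(numbers)
--     width = 0
--     for row in numbers:
--         if len(row) > width:
--             width = len(row)
--     for j in range(width):
--         for i, row in enumerate(numbers):
--             if j < len(row):
--                 column = row[j]
--                 if isinstance(column, str):
--                     raise ValueError("No string allow")
--                 elif isinstance(column, float):
--                     raise ValueError("And no float")
--                 totals[i] += column
--     return totals
-- ===== Notes on version B (the rewrite author's own statement) =====
-- stated objective: alternative
-- what changed: Replaces A's row-major map(sum) with a column-major algorithm: a totals vector (one slot per row) is updated column index by column index up to the maximum row width, so the data is traversed in a different order and a different state (per-row partial sums) is maintained.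
-- outside the precondition, e.g. on sum_all_elements([]): A raises TypeError, B raises TypeError
import Mathlib
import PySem

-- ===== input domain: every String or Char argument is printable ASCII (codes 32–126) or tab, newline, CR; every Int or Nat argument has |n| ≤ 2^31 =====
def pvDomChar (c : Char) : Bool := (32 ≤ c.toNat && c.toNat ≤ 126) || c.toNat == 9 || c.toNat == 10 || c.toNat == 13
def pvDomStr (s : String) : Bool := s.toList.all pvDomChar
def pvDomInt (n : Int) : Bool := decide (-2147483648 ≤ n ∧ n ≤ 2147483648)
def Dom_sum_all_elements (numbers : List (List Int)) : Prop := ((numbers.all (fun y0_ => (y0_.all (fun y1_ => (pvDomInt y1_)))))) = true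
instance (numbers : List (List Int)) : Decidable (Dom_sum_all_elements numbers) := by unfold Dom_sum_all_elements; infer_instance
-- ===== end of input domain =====

-- B sums column-major: a totals vector updated column index by column index (different traversal order/state than A's row-major map(sum); same cost). A raises on the empty list, excluded by Pre_.


-- ===== PORT A =====
-- A: (the str/float validation loop is a no-op on List (List Int)), then total = list(map(sum, numbers))
def sum_all_elements (numbers : List (List Int)) : List Int :=
  numbers.map (fun row => row.foldl (fun s column => s + column) 0)

-- ===== PORT B =====
-- B's inner enumerate loop: one column step j over all rows, updating each total pointwise
-- (row[j] with 0 ≤ j < len(row) is exactly row.getD j 0)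
def colStep (j : Nat) (totals : List Int) (rows : List (List Int)) : List Int :=
  match totals, rows with
  | t :: ts, row :: rs => (if j < row.length then t + row.getD j 0 else t) :: colStep j ts rs
  | _, _ => []

-- B: totals = [0]*len(numbers); width = max row length; for j in range(width): column step j
def sum_all_elements_alt (numbers : List (List Int)) : List Int :=
  let width := numbers.foldl (fun m r => max m r.length) 0
  (List.range width).foldl (fun totals j => colStep j totals numbers)
    (List.replicate numbers.length 0)

-- ===== PRECONDITION & SPEC =====
-- Pre_ excludes the empty list, on which A raises TypeError("Cannot be empty").
def Pre_sum_all_elements (numbers : List (List Int)) : Prop := numbers ≠ []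
instance (numbers : List (List Int)) : Decidable (Pre_sum_all_elements numbers) := by unfold Pre_sum_all_elements; infer_instance
def pvWitness_sum_all_elements : List (List Int) := [[1, 2], [3]]
def Spec_sum_all_elements (numbers : List (List Int)) (out : List Int) : Prop := out = sum_all_elements_alt numbers
instance (numbers : List (List Int)) (out : List Int) : Decidable (Spec_sum_all_elements numbers out) := by unfold Spec_sum_all_elements; infer_instance

-- ===== CLAIM (what is proved, stated in full; the proofs are below) =====
def Claim_equal_sum_all_elements : Prop := ∀ (numbers : List (List Int)), Dom_sum_all_elements numbers → Pre_sum_all_elements numbers → Spec_sum_all_elements numbers (sum_all_elements numbers)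

-- ===== LEMMAS AND PROOFS =====
-- colStep is pointwise, so the fold over column indices splits head/tail
theorem fold_colStep_cons (L : List Nat) (row : List Int) (rs : List (List Int))
    (t : Int) (ts : List Int) :
    L.foldl (fun totals j => colStep j totals (row :: rs)) (t :: ts)
      = (L.foldl (fun s j => if j < row.length then s + row.getD j 0 else s) t)
        :: L.foldl (fun totals j => colStep j totals rs) ts := by
  induction L generalizing t ts with
  | nil => rfl
  | cons j L ih => simp only [List.foldl_cons, colStep, ih]

-- a single row's column fold over range w, w ≥ its length, is its sum
theorem single_row_fold (row : List Int) (t : Int) (w : Nat) (hw : row.length ≤ w) :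
    (List.range w).foldl (fun s j => if j < row.length then s + row.getD j 0 else s) t
      = t + row.foldl (fun s column => s + column) 0 := by
  induction w generalizing row t with
  | zero =>
    have : row = [] := List.eq_nil_of_length_eq_zero (Nat.le_zero.mp hw)
    simp [this]
  | succ w ih =>
    have hstep : ∀ (s : Int),
        (List.range (w+1)).foldl (fun s j => if j < row.length then s + row.getD j 0 else s) s
          = (if w < row.length then
              ((List.range w).foldl (fun s j => if j < row.length then s + row.getD j 0 else s) s)
                + row.getD w 0
             else (List.range w).foldl (fun s j => if j < row.length then s + row.getD j 0 else s) s) := by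
      intro s
      rw [List.range_succ, List.foldl_append]
      split_ifs with h <;> simp [h]
    by_cases h : row.length ≤ w
    · rw [hstep, if_neg (by omega), ih row t h]
    · -- row.length = w + 1: split off the last element
      have hlen : row.length = w + 1 := by omega
      obtain ⟨ys, z, rfl⟩ : ∃ ys z, row = ys ++ [z] := by
        rcases List.eq_nil_or_concat row with h0 | ⟨ys, z, h0⟩
        · exfalso; rw [h0] at hlen; simp at hlen
        · exact ⟨ys, z, by simpa using h0⟩
      have hys : ys.length = w := by simpa using hlen
      rw [hstep, if_pos (by simp [hys])]
      have hcongr : (List.range w).foldl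
          (fun s j => if j < (ys ++ [z]).length then s + (ys ++ [z]).getD j 0 else s) t
            = (List.range w).foldl (fun s j => if j < ys.length then s + ys.getD j 0 else s) t := by
        apply PySem.List.foldl_congr_mem
        intro s j hj
        have hjw : j < w := List.mem_range.mp hj
        have hj' : j < ys.length := by omega
        simp [List.getD, hlen, hys, hjw, Nat.lt_succ_of_lt hjw]
      rw [hcongr, ih ys t (le_of_eq hys)]
      have : (ys ++ [z]).getD w 0 = z := by
        simp [List.getD, hys]
      rw [this]
      simp [List.foldl_append]
      ring
-- the width fold only grows its accumulator
theorem foldl_max_le (rs : List (List Int)) (m m' : Nat) (h : m ≤ m') :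
    m ≤ rs.foldl (fun a r => max a r.length) m' := by
  induction rs generalizing m' with
  | nil => exact h
  | cons a as ih => exact ih _ (le_trans h (le_max_left _ _))

-- the width fold bounds every row length
theorem length_le_width (numbers : List (List Int)) (row : List Int) (h : row ∈ numbers)
    (m : Nat) : row.length ≤ numbers.foldl (fun m r => max m r.length) m := by
  induction numbers generalizing m with
  | nil => cases h
  | cons r rs ih =>
    rcases List.mem_cons.mp h with h | h
    · subst h
      exact foldl_max_le rs _ _ (le_max_right _ _)
    · exact ih h _

-- column-major fold from a fresh totals vector = row-major map of sums, for any big-enough width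
theorem col_fold_eq_map (numbers : List (List Int)) (w : Nat)
    (hw : ∀ r ∈ numbers, r.length ≤ w) :
    (List.range w).foldl (fun totals j => colStep j totals numbers)
        (List.replicate numbers.length 0)
      = numbers.map (fun row => row.foldl (fun s column => s + column) 0) := by
  induction numbers with
  | nil =>
    have h0 : ∀ (L : List Nat), L.foldl (fun totals j => colStep j totals ([] : List (List Int))) [] = [] := by
      intro L; induction L with
      | nil => rfl
      | cons j L ih => rw [List.foldl_cons]; exact ih
    simpa using h0 (List.range w)
  | cons row rs ih =>
    simp only [List.length_cons, List.replicate_succ, fold_colStep_cons, List.map_cons]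
    rw [single_row_fold row 0 w (hw row (by simp)), ih (fun r hr => hw r (by simp [hr]))]
    simp

-- ===== VERDICT (by name: the statement is the Claim_ definition above) =====
theorem sum_all_elements_spec : Claim_equal_sum_all_elements := by
  intro numbers _ _
  unfold Spec_sum_all_elements sum_all_elements sum_all_elements_alt
  exact (col_fold_eq_map numbers _ (fun r hr => length_le_width numbers r hr 0)).symm
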